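-- pv_equiv track=rewrite | github.com/yfq512/cervival_yfq | cell_save_fun.py | get_last2value
-- ===== SOURCE A (Python) =====
-- def get_last2value(temp):
--     sign1 = 0
--     sign2 = 0
--     cnt = 0
--     value = 0
--     temp_4 = temp[::-1]
--     for k in range(0, len(temp_4)-1):
--         if temp_4[k+1] > temp_4[k]:
--             sign2 = sign1
--             sign1 = 1
--             if sign1 != sign2:
--                 cnt = cnt + 1
--         else:
--             sign2 = sign1
--             sign1 = 0
--             if sign1 != sign2:
--                 cnt = cnt + 1
--         if cnt == 3:
--             value = k
--             break #!!!!!!!!!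
--     return 255-value
-- ===== SOURCE B (Python) =====
-- def _runs(s):
--     # run lengths of consecutive equal elements, one index-based pass
--     runs = []
--     i = 0
--     while i < len(s):
--         j = i + 1
--         while j < len(s) and s[j] == s[i]:
--             j += 1
--         runs.append(j - i)
--         i = j
--     return runs
--
-- def get_last2value(temp):
--     rev = temp[::-1]
--     dirs = [rev[i + 1] > rev[i] for i in range(len(rev) - 1)]
--     runs = _runs([False] + dirs)
--     if len(runs) >= 4:
--         return 255 - (runs[0] + runs[1] + runs[2] - 1)
--     return 255
-- ===== Notes on version B (the rewrite author's own statement) =====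
-- stated objective: alternative
-- what changed: Replaces A's element-wise sign1/sign2/cnt state machine with a run-length view: build the direction sequence of the reversed list, prepend the implicit initial False, compute run lengths, and read the third direction change off the first three run lengths (255 - (r1+r2+r3-1)), returning 255 when there are fewer than four runs.
import Mathlib
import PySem

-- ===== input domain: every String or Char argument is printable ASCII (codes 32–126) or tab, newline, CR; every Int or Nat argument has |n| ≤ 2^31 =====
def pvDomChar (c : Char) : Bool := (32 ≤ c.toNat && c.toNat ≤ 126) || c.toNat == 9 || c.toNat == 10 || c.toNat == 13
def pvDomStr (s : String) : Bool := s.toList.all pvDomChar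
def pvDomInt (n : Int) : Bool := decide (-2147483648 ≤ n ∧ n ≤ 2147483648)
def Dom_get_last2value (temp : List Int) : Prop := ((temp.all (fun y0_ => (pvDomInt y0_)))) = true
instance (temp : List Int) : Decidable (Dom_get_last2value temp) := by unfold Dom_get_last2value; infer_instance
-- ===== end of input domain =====

-- B replaces A's sign1/sign2/cnt state machine with a run-length decomposition of the
-- direction sequence (alternative algorithm, same cost).


-- ===== PORT A =====
-- the for-k loop with its early break; indices k and k+1 are always < len(temp_4), so
-- getD's default is never consulted (exact port of temp_4[k]/temp_4[k+1])
def get_last2value_loop (t4 : List Int) (k : Nat) (sign1 cnt : Int) : Int :=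
  if _h : k < t4.length - 1 then
    let sign2 := sign1
    let sign1' : Int := if t4.getD (k + 1) 0 > t4.getD k 0 then 1 else 0
    let cnt' := if sign1' ≠ sign2 then cnt + 1 else cnt
    if cnt' = 3 then (k : Int)
    else get_last2value_loop t4 (k + 1) sign1' cnt'
  else 0
termination_by t4.length - 1 - k

def get_last2value (temp : List Int) : Int :=
  -- temp[::-1] is temp.reverse (PySem.List.slice?_none_none_neg_one)
  255 - get_last2value_loop temp.reverse 0 0 0

-- ===== PORT B =====
def pvDirs (l : List Int) : List Bool :=
  (l.zip (l.drop 1)).map (fun p => decide (p.2 > p.1))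

-- Source B's _runs: one index-based pass; the inner while counts the run of elements equal
-- to s[i] (index i always < len(s), so getD's default is never consulted)
def pvRunsFrom (s : List Bool) (i : Nat) : List Nat :=
  if _h : i < s.length then
    let j := i + 1 + ((s.drop (i + 1)).takeWhile (fun y => y == s.getD i false)).length
    (j - i) :: pvRunsFrom s j
  else []
termination_by s.length - i
decreasing_by omega

def get_last2value_alt (temp : List Int) : Int :=
  match pvRunsFrom (false :: pvDirs temp.reverse) 0 with
  | r1 :: r2 :: r3 :: _ :: _ => 255 - ((r1 : Int) + (r2 : Int) + (r3 : Int) - 1)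
  | _ => 255

-- ===== PRECONDITION & SPEC =====
def Spec_get_last2value (temp : List Int) (out : Int) : Prop := out = get_last2value_alt temp
instance (temp : List Int) (out : Int) : Decidable (Spec_get_last2value temp out) := by unfold Spec_get_last2value; infer_instance

-- ===== CLAIM (what is proved, stated in full; the proofs are below) =====
def Claim_equal_get_last2value : Prop := ∀ (temp : List Int), Dom_get_last2value temp → Spec_get_last2value temp (get_last2value temp)

-- ===== LEMMAS AND PROOFS =====

-- run lengths by recursion on the tail: the proof-side view of _runs
def pvRunLengths : List Bool → List Nat
  | [] => []
  | [_] => [1]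
  | x :: y :: xs =>
    match pvRunLengths (y :: xs) with
    | r :: rs => if x = y then (r + 1) :: rs else 1 :: r :: rs
    | [] => [1]

theorem pvRunLengths_ne_nil (x : Bool) (xs : List Bool) : pvRunLengths (x :: xs) ≠ [] := by
  cases xs with
  | nil => simp [pvRunLengths]
  | cons y ys =>
    rcases h : pvRunLengths (y :: ys) with _ | ⟨r, rs⟩
    · simp [pvRunLengths, h]
    · simp only [pvRunLengths, h]
      split <;> simp

theorem pvRunLengths_cons_exists (x : Bool) (xs : List Bool) :
    ∃ r rs, pvRunLengths (x :: xs) = r :: rs := by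
  rcases h : pvRunLengths (x :: xs) with _ | ⟨r, rs⟩
  · exact absurd h (pvRunLengths_ne_nil x xs)
  · exact ⟨r, rs, rfl⟩

-- peeling one whole run off pvRunLengths
theorem pv_dropWhile_eq_drop (l : List Bool) (p : Bool → Bool) :
    l.dropWhile p = l.drop (l.takeWhile p).length := by
  induction l with
  | nil => rfl
  | cons x xs ih => by_cases h : p x <;> simp [h, ih]

theorem pv_takeWhile_length_le (l : List Bool) (p : Bool → Bool) :
    (l.takeWhile p).length ≤ l.length := by
  induction l with
  | nil => simp
  | cons x xs ih => by_cases h : p x <;> simp [h] <;> omega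

theorem pvRunLengths_run (x : Bool) (xs : List Bool) :
    pvRunLengths (x :: xs) =
      (1 + (xs.takeWhile (fun y => y == x)).length) ::
        pvRunLengths (xs.dropWhile (fun y => y == x)) := by
  induction xs generalizing x with
  | nil => simp [pvRunLengths]
  | cons y ys ih =>
    by_cases hxy : y = x
    · subst hxy
      rw [pvRunLengths, ih y]
      simp only [List.takeWhile_cons, List.dropWhile_cons, BEq.rfl, if_pos, ite_true,
        List.length_cons]
      simp only [List.cons.injEq]
      exact ⟨by omega, by trivial⟩
    · have hne : x ≠ y := fun hh => hxy hh.symm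
      have hby : (y == x) = false := by simp [hxy]
      rw [pvRunLengths]
      rcases h : pvRunLengths (y :: ys) with _ | ⟨r, rs⟩
      · exact absurd h (pvRunLengths_ne_nil y ys)
      · simp [hne, hby, h.symm]

-- the index-based pass of the B port computes pvRunLengths of the remaining suffix
theorem pvRunsFrom_eq (s : List Bool) (j i : Nat) (hj : s.length - i = j) :
    pvRunsFrom s i = pvRunLengths (s.drop i) := by
  induction j using Nat.strong_induction_on generalizing i with
  | _ j ih =>
    by_cases h : i < s.length
    · have hd : s.drop i = s[i] :: s.drop (i + 1) := List.drop_eq_getElem_cons h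
      have hgd : s.getD i false = s[i] := List.getD_eq_getElem s false h
      have hlt : ((s.drop (i + 1)).takeWhile (fun y => y == s[i])).length ≤
          s.length - (i + 1) := by
        have := pv_takeWhile_length_le (s.drop (i + 1)) (fun y => y == s[i])
        simpa using this
      rw [pvRunsFrom, dif_pos h, hd, pvRunLengths_run]
      simp only [hgd]
      have htw : (s.drop (i + 1)).dropWhile (fun y => y == s[i]) =
          s.drop (i + 1 + ((s.drop (i + 1)).takeWhile (fun y => y == s[i])).length) := by
        rw [pv_dropWhile_eq_drop, List.drop_drop, Nat.add_comm]
      rw [ih (s.length - (i + 1 + ((s.drop (i + 1)).takeWhile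
            (fun y => y == s[i])).length)) (by omega) _ rfl, ← htw]
      simp only [List.cons.injEq]
      exact ⟨by omega, by trivial⟩
    · rw [pvRunsFrom, dif_neg h, List.drop_eq_nil_of_le (by omega), pvRunLengths]

-- abstract boolean-direction scan equivalent to A's loop
def pvBScan : List Bool → Bool → Int → Nat → Int
  | [], _, _, _ => 0
  | b :: rest, sb, c, k =>
    let c' := if b ≠ sb then c + 1 else c
    if c' = 3 then (k : Int) else pvBScan rest b c' (k + 1)

def pvBSign (b : Bool) : Int := if b then 1 else 0

theorem pvDirs_length (l : List Int) : (pvDirs l).length = l.length - 1 := by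
  simp [pvDirs]

theorem pvDirs_getElem (l : List Int) (k : Nat) (h : k < (pvDirs l).length) :
    (pvDirs l)[k] = decide (l.getD (k + 1) 0 > l.getD k 0) := by
  have hlen : k < l.length - 1 := by rwa [pvDirs_length] at h
  have h1 : l[k]? = some (l[k]'(by omega)) := List.getElem?_eq_getElem (by omega)
  have h2 : l[k+1]? = some (l[k+1]'(by omega)) := List.getElem?_eq_getElem (by omega)
  simp [pvDirs, List.getD_eq_getElem?_getD, h1, h2]

-- A's loop equals the abstract boolean scan over the direction list
theorem loop_eq_bscan (t4 : List Int) (j k : Nat) (sb : Bool) (c : Int)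
    (hj : t4.length - 1 - k = j) :
    get_last2value_loop t4 k (pvBSign sb) c = pvBScan ((pvDirs t4).drop k) sb c k := by
  induction j generalizing k sb c with
  | zero =>
    have hk : ¬ k < t4.length - 1 := by omega
    rw [get_last2value_loop]
    have hd : (pvDirs t4).drop k = [] := by
      apply List.drop_eq_nil_of_le; rw [pvDirs_length]; omega
    simp only [hk, dite_false, hd, pvBScan, dif_neg, not_false_eq_true]
  | succ j ih =>
    have hk : k < t4.length - 1 := by omega
    have hkd : k < (pvDirs t4).length := by rw [pvDirs_length]; omega
    have hd : (pvDirs t4).drop k = (pvDirs t4)[k] :: (pvDirs t4).drop (k + 1) :=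
      List.drop_eq_getElem_cons hkd
    rw [get_last2value_loop, dif_pos hk, hd, pvDirs_getElem t4 k hkd]
    by_cases hc : t4.getD (k + 1) 0 > t4.getD k 0 <;> cases sb <;>
      simp only [hc, decide_true, decide_false, pvBScan, pvBSign, ne_eq,
        Bool.true_eq_false, Bool.false_eq_true, not_false_eq_true, not_true_eq_false,
        if_true, if_false, ite_true, ite_false, one_ne_zero, zero_ne_one]
    all_goals
      split_ifs with _h3
      · rfl
      · first
          | exact ih (k + 1) true (c + 1) (by omega)
          | exact ih (k + 1) true c (by omega)
          | exact ih (k + 1) false (c + 1) (by omega)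
          | exact ih (k + 1) false c (by omega)

-- the boolean scan in terms of the run lengths of (sb :: d): m further changes are
-- needed (c + m = 3); the m-th further change sits at d-offset (sum of first m runs) - 1
theorem bscan_eq_runs (d : List Bool) (sb : Bool) (c : Int) (k : Nat) (m : Nat)
    (hcm : c + (m : Int) = 3) (hm : 1 ≤ m) :
    pvBScan d sb c k =
      if m + 1 ≤ (pvRunLengths (sb :: d)).length then
        (k : Int) + (((pvRunLengths (sb :: d)).take m).sum : Int) - 1
      else 0 := by
  induction d generalizing sb c k m with
  | nil =>
    have : ¬ m + 1 ≤ (pvRunLengths [sb]).length := by simp [pvRunLengths]; omega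
    simp [pvBScan, this]
  | cons b rest ih =>
    obtain ⟨r, rs, hr⟩ := pvRunLengths_cons_exists b rest
    by_cases hb : b = sb
    · -- same direction: first run extends, no change counted
      subst hb
      have hrl : pvRunLengths (b :: b :: rest) = (r + 1) :: rs := by
        rw [pvRunLengths, hr]; simp
      simp only [pvBScan, ne_eq, not_true_eq_false, if_false, ite_false]
      rw [ih b c (k + 1) m hcm hm, hrl, hr]
      rcases m with _ | m'
      · omega
      · simp only [List.take_succ_cons, List.sum_cons, List.length_cons]
        split <;> push_cast <;> omega
    · -- direction change
      have hrl : pvRunLengths (sb :: b :: rest) = 1 :: r :: rs := by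
        have hns : sb ≠ b := fun h => hb h.symm
        rw [pvRunLengths, hr]; simp [hns]
      have hbne : b ≠ sb := hb
      simp only [pvBScan, hbne, ne_eq, not_false_eq_true, if_true, ite_true]
      by_cases h3 : c + 1 = 3
      · -- this is the third change: m = 1
        have hm1 : m = 1 := by omega
        subst hm1
        rw [if_pos h3, hrl]
        simp
      · have hm2 : 2 ≤ m := by omega
        rcases m with _ | m'
        · omega
        have hm1' : 1 ≤ m' := by omega
        rw [if_neg h3, ih b (c + 1) (k + 1) m' (by push_cast at hcm ⊢; omega) hm1', hrl, hr]
        simp only [List.take_succ_cons, List.sum_cons, List.length_cons]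
        split <;> push_cast <;> omega

-- ===== VERDICT (by name: the statement is the Claim_ definition above) =====
theorem get_last2value_spec : Claim_equal_get_last2value := by
  intro temp _
  unfold Spec_get_last2value get_last2value get_last2value_alt
  have hL := loop_eq_bscan temp.reverse (temp.reverse.length - 1 - 0) 0 false 0 rfl
  simp only [pvBSign, ite_false, Bool.false_eq_true, if_false, List.drop_zero] at hL
  rw [hL, bscan_eq_runs (pvDirs temp.reverse) false 0 0 3 (by norm_num) (by norm_num),
    pvRunsFrom_eq (false :: pvDirs temp.reverse) _ 0 rfl, List.drop_zero]
  rcases h : pvRunLengths (false :: pvDirs temp.reverse) with _ | ⟨r1, rs1⟩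
  · simp
  rcases rs1 with _ | ⟨r2, rs2⟩
  · simp
  rcases rs2 with _ | ⟨r3, rs3⟩
  · simp
  rcases rs3 with _ | ⟨r4, rs4⟩
  · simp
  · simp only [List.length_cons, List.take_succ_cons, List.take_zero, List.sum_cons,
      List.sum_nil]
    have hlen : 3 + 1 ≤ rs4.length + 1 + 1 + 1 + 1 := by omega
    rw [if_pos hlen]
    push_cast; ring
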